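-- pv_equiv track=rewrite | github.com/lvonbank/IT210-Python | PA2/PA2.py | validNumbers
-- ===== SOURCE A (Python) =====
-- ROW = 4
--
-- COLUMN = 4
--
-- def validNumbers(table):
--     # Creates a version of the usersInput without sub lists
--     testList = []
--     for i in range(ROW):
--         for j in range(COLUMN):
--             testList.append(table[i][j])
--     testList.sort()  # Sorts it new list for crosschecking
--
--     # Produces a list of 1, 2, ..., 16 to cross-reference with
--     validTable = []
--     numbers = 0
--     for i in range(ROW):
--         for j in range(COLUMN):
--             numbers += 1
--             validTable.append(int(numbers))
--
--     # Checks users list to validate content (the use of 1, 2, ..., 16)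
--     # Sent back True only if it matches requirements
--     if testList == validTable:
--         return True
--     else: return False
-- ===== SOURCE B (Python) =====
-- ROW = 4
--
-- COLUMN = 4
--
-- def validNumbers(table):
--     # Flatten the 4x4 table by explicit indexing, then check that every
--     # required number 1..16 occurs: 16 cells containing all of 1..16 are
--     # necessarily exactly the numbers 1..16, so no sort/compare is needed.
--     flat = [table[i][j] for i in range(ROW) for j in range(COLUMN)]
--     return all(n in flat for n in range(1, 17))
-- ===== Notes on version B (the rewrite author's own statement) =====
-- stated objective: simpler
-- what changed: B drops the sort-and-compare against a built reference list and instead checks membership of each of 1..16 in the flattened 16-cell list, which is equivalent by the pigeonhole argument.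
import Mathlib
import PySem

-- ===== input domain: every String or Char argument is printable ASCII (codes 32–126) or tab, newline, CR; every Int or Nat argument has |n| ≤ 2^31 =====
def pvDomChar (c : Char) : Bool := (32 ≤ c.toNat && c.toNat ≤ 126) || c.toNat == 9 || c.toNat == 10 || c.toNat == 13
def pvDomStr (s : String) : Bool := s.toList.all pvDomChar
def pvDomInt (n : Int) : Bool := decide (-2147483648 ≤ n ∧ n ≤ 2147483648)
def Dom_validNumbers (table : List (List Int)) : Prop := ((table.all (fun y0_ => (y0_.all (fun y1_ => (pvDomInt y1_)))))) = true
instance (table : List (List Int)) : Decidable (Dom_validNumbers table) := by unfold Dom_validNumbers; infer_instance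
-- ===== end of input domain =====

-- B replaces A's sort-and-compare-to-[1..16] by membership checks of each of 1..16
-- in the flattened 16-cell list (equivalent: 16 cells containing all of 1..16 are a permutation).

-- ===== PORT A =====
-- flatten with table[i][j]; sort; build [1, 2, ..., 16] via a counter; compare.
def validNumbers (table : List (List Int)) : Bool :=
  let testList : List Int :=
    (PySem.List.pyRange 0 4 1).foldl (fun acc i =>
      (PySem.List.pyRange 0 4 1).foldl (fun acc j =>
        acc ++ [PySem.List.pyGetD (PySem.List.pyGetD table i []) j 0]) acc) []
  let testList := PySem.List.sorted testList id false
  let st : Int × List Int :=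
    (PySem.List.pyRange 0 4 1).foldl (fun st _i =>
      (PySem.List.pyRange 0 4 1).foldl (fun st _j =>
        (st.1 + 1, st.2 ++ [st.1 + 1])) st) (0, [])
  if testList = st.2 then true else false

-- ===== PORT B =====
-- flatten by the comprehension [table[i][j] for i for j]; then all(n in flat for n in range(1,17)).
def validNumbers_alt (table : List (List Int)) : Bool :=
  let flat : List Int :=
    (PySem.List.pyRange 0 4 1).flatMap (fun i =>
      (PySem.List.pyRange 0 4 1).map (fun j =>
        PySem.List.pyGetD (PySem.List.pyGetD table i []) j 0))
  (PySem.List.pyRange 1 17 1).all (fun n => flat.contains n)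

-- ===== PRECONDITION & SPEC =====
-- Pre_ excludes exactly the tables on which the Python A raises IndexError
-- (fewer than 4 rows, or one of the first 4 rows with fewer than 4 entries).
def Pre_validNumbers (table : List (List Int)) : Prop :=
  4 ≤ table.length ∧ ∀ r ∈ table.take 4, 4 ≤ r.length
instance (table : List (List Int)) : Decidable (Pre_validNumbers table) := by
  unfold Pre_validNumbers; infer_instance

def pvWitness_validNumbers : List (List Int) :=
  [[1, 2, 3, 4], [5, 6, 7, 8], [9, 10, 11, 12], [13, 14, 15, 16]]

def Spec_validNumbers (table : List (List Int)) (out : Bool) : Prop := out = validNumbers_alt table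
instance (table : List (List Int)) (out : Bool) : Decidable (Spec_validNumbers table out) := by
  unfold Spec_validNumbers; infer_instance

-- ===== CLAIM (what is proved, stated in full; the proofs are below) =====
def Claim_equal_validNumbers : Prop :=
  ∀ (table : List (List Int)), Dom_validNumbers table → Pre_validNumbers table →
    Spec_validNumbers table (validNumbers table)

-- ===== LEMMAS AND PROOFS =====

-- both ports flatten to the same 16-element list
def pvFlat (table : List (List Int)) : List Int :=
  (PySem.List.pyRange 0 4 1).flatMap (fun i =>
    (PySem.List.pyRange 0 4 1).map (fun j =>
      PySem.List.pyGetD (PySem.List.pyGetD table i []) j 0))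

lemma pvFlat_length (table : List (List Int)) : (pvFlat table).length = 16 := by
  simp [pvFlat, PySem.List.pyRange]
  decide

lemma a_flatten_eq (table : List (List Int)) :
    (PySem.List.pyRange 0 4 1).foldl (fun acc i =>
      (PySem.List.pyRange 0 4 1).foldl (fun acc j =>
        acc ++ [PySem.List.pyGetD (PySem.List.pyGetD table i []) j 0]) acc) []
    = pvFlat table := by
  simp only [PySem.List.foldl_append_singleton_eq_map, PySem.List.foldl_append_eq_flatMap]
  rfl

-- A's counter loop builds exactly the list 1..16
lemma a_validTable_eq :
    ((PySem.List.pyRange 0 4 1).foldl (fun st (_i : Int) =>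
      (PySem.List.pyRange 0 4 1).foldl (fun st (_j : Int) =>
        (st.1 + 1, st.2 ++ [st.1 + 1])) st) ((0 : Int), ([] : List Int))).2
    = PySem.List.pyRange 1 17 1 := by decide

-- the key equivalence: a 16-element list sorts to [1..16] iff it contains all of 1..16
lemma sorted_eq_iff_all_mem (L : List Int) (hlen : L.length = 16) :
    (PySem.List.sorted L id false = PySem.List.pyRange 1 17 1)
      ↔ ∀ n ∈ PySem.List.pyRange 1 17 1, n ∈ L := by
  constructor
  · intro h n hn
    have := (PySem.List.sorted_perm L id false).mem_iff (a := n)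
    rw [h] at this
    exact this.mp hn
  · intro h
    have hsub : PySem.List.pyRange 1 17 1 ⊆ L := fun n hn => h n hn
    have hnd : (PySem.List.pyRange 1 17 1).Nodup := PySem.List.nodup_pyRange_one 1 17
    have hsp : List.Subperm (PySem.List.pyRange 1 17 1) L := hnd.subperm hsub
    have hperm : (PySem.List.pyRange 1 17 1).Perm L := by
      refine hsp.perm_of_length_le ?_
      simp [hlen, PySem.List.length_pyRange_one]
    exact PySem.List.sorted_eq_of_perm_of_pairwise_lt L (PySem.List.pyRange 1 17 1) id
      hperm (PySem.List.pairwise_lt_pyRange_one 1 17)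

-- ===== VERDICT (by name: the statement is the Claim_ definition above) =====
theorem validNumbers_spec : Claim_equal_validNumbers := by
  intro table _ _
  unfold Spec_validNumbers
  show validNumbers table = validNumbers_alt table
  simp only [validNumbers, validNumbers_alt, a_flatten_eq, a_validTable_eq]
  have key := sorted_eq_iff_all_mem (pvFlat table) (pvFlat_length table)
  have hall : (((PySem.List.pyRange 1 17 1).all fun n => (pvFlat table).contains n) = true) ↔
      ∀ n ∈ PySem.List.pyRange 1 17 1, n ∈ pvFlat table := by
    simp
  by_cases h : PySem.List.sorted (pvFlat table) id false = PySem.List.pyRange 1 17 1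
  · rw [if_pos h]
    exact (hall.mpr (key.mp h)).symm
  · rw [if_neg h]
    symm
    rw [Bool.eq_false_iff]
    intro hc
    exact h (key.mpr (hall.mp hc))
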